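-- pv_equiv track=rewrite | github.com/ahsan-007/Competitive-Programming | Daily Streak/Easy/TrionicArrayI.py | isTrionicV2
-- ===== SOURCE A (Python) =====
-- from typing import List
--
-- def isTrionicV2(nums: List[int]) -> bool:
--     state = 0
--     for i in range(1, len(nums)):
--         if nums[i] == nums[i - 1]:
--             return False
--
--         if state == 0:
--             if nums[i] < nums[i-1]:
--                 if i == 1:
--                     return False
--                 state = 1
--
--         elif state == 1:
--             if nums[i] > nums[i - 1]:
--                 state = 2
--
--         elif state == 2:
--             if nums[i] < nums[i - 1]:
--                 return False
--
--     return state == 2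
-- ===== SOURCE B (Python) =====
-- from typing import List
--
-- def isTrionicV2(nums: List[int]) -> bool:
--     n = len(nums)
--     i = 0
--     # phase 1: strictly increasing
--     start = i
--     while i + 1 < n and nums[i + 1] > nums[i]:
--         i += 1
--     if i == start:
--         return False
--     # phase 2: strictly decreasing
--     start = i
--     while i + 1 < n and nums[i + 1] < nums[i]:
--         i += 1
--     if i == start:
--         return False
--     # phase 3: strictly increasing
--     start = i
--     while i + 1 < n and nums[i + 1] > nums[i]:
--         i += 1
--     if i == start:
--         return False
--     return i == n - 1
-- ===== Notes on version B (the rewrite author's own statement) =====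
-- stated objective: alternative
-- what changed: Replaced A's single for-loop state machine (state 0/1/2 with per-step branching) by a three-phase pointer walk: three while-loops each consuming one strictly monotonic segment, each required to advance, then a final end-of-array check.
import Mathlib
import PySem

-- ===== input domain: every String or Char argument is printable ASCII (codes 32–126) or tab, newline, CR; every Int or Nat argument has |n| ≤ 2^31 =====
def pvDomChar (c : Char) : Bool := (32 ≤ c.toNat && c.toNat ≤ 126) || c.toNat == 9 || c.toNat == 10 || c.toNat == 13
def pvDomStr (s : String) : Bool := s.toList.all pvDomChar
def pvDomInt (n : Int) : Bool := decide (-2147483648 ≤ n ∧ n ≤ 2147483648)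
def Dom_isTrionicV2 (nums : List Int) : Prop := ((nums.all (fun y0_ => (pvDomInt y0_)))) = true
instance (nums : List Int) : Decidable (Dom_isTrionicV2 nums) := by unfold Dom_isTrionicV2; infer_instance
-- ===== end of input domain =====

-- B re-implements the same up-down-up check as a three-phase pointer walk (three while-loops over strictly
-- monotonic segments) instead of A's single-pass 0/1/2 state machine; same O(n) cost.

-- ===== PORT A =====
-- A's for-loop over i in range(1, len(nums)) with its early returns, as structural recursion
-- over the list carrying A's loop state: (state, the "i == 1" first-iteration flag, nums[i-1]).
def isTrionicV2Go (state : Int) (isFirst : Bool) (prev : Int) : List Int → Bool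
  | [] => state == 2
  | x :: xs =>
    if x == prev then false
    else if state == 0 then
      (if x < prev then
        (if isFirst then false else isTrionicV2Go 1 false x xs)
      else isTrionicV2Go 0 false x xs)
    else if state == 1 then
      (if x > prev then isTrionicV2Go 2 false x xs else isTrionicV2Go 1 false x xs)
    else
      (if x < prev then false else isTrionicV2Go 2 false x xs)

def isTrionicV2 (nums : List Int) : Bool :=
  match nums with
  | [] => false
  | p :: rest => isTrionicV2Go 0 true p rest

-- ===== PORT B =====
-- One while-loop of Source B: advance i while the next element is strictly greater (up = true) /
-- strictly smaller (up = false) than the current one.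
def isTrionicV2Walk (up : Bool) (nums : List Int) (i : Nat) : Nat :=
  if h : i + 1 < nums.length then
    if (if up then nums[i]'(by omega) < nums[i+1]'h else nums[i+1]'h < nums[i]'(by omega)) then
      isTrionicV2Walk up nums (i + 1)
    else i
  else i
termination_by nums.length - i

def isTrionicV2_alt (nums : List Int) : Bool :=
  let n := nums.length
  let i1 := isTrionicV2Walk true nums 0
  if i1 == 0 then false
  else
    let i2 := isTrionicV2Walk false nums i1
    if i2 == i1 then false
    else
      let i3 := isTrionicV2Walk true nums i2
      if i3 == i2 then false
      else i3 == n - 1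

-- ===== PRECONDITION & SPEC =====
def Spec_isTrionicV2 (nums : List Int) (out : Bool) : Prop := out = isTrionicV2_alt nums
instance (nums : List Int) (out : Bool) : Decidable (Spec_isTrionicV2 nums out) := by unfold Spec_isTrionicV2; infer_instance

-- ===== CLAIM (what is proved, stated in full; the proofs are below) =====
def Claim_equal_isTrionicV2 : Prop := ∀ (nums : List Int), Dom_isTrionicV2 nums → Spec_isTrionicV2 nums (isTrionicV2 nums)

-- ===== LEMMAS AND PROOFS =====

-- unfolding lemmas for A's loop with the Int-literal state tests resolved
theorem go_nil (s : Int) (f : Bool) (p : Int) : isTrionicV2Go s f p [] = (s == 2) := rfl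

theorem go0_cons (f : Bool) (prev x : Int) (xs : List Int) :
    isTrionicV2Go 0 f prev (x :: xs) =
      (if x == prev then false
       else if x < prev then (if f then false else isTrionicV2Go 1 false x xs)
       else isTrionicV2Go 0 false x xs) := by
  rw [isTrionicV2Go]; norm_num

theorem go1_cons (f : Bool) (prev x : Int) (xs : List Int) :
    isTrionicV2Go 1 f prev (x :: xs) =
      (if x == prev then false
       else if prev < x then isTrionicV2Go 2 false x xs
       else isTrionicV2Go 1 false x xs) := by
  rw [isTrionicV2Go]; norm_num

theorem go2_cons (f : Bool) (prev x : Int) (xs : List Int) :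
    isTrionicV2Go 2 f prev (x :: xs) =
      (if x == prev then false
       else if x < prev then false
       else isTrionicV2Go 2 false x xs) := by
  rw [isTrionicV2Go]; norm_num

-- number of steps in the strictly monotonic (up/down) prefix of a list
def segLen (up : Bool) : List Int → Nat
  | a :: b :: xs => if (if up then a < b else b < a) then segLen up (b :: xs) + 1 else 0
  | _ => 0

theorem segLen_nil (up : Bool) : segLen up [] = 0 := rfl
theorem segLen_one (up : Bool) (a : Int) : segLen up [a] = 0 := rfl
theorem segLen_cons (up : Bool) (a b : Int) (xs : List Int) :
    segLen up (a :: b :: xs) =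
      if (if up then a < b else b < a) then segLen up (b :: xs) + 1 else 0 := by
  rw [segLen]

-- B's while-loop walks exactly the strictly monotonic segment starting at i
theorem walk_eq (up : Bool) (nums : List Int) (i : Nat) :
    isTrionicV2Walk up nums i = i + segLen up (nums.drop i) := by
  fun_induction isTrionicV2Walk up nums i with
  | case1 i h hc ih =>
    have hd : nums.drop i = nums[i] :: nums.drop (i + 1) :=
      List.drop_eq_getElem_cons (by omega)
    have hd2 : nums.drop (i + 1) = nums[i+1] :: nums.drop (i + 2) :=
      List.drop_eq_getElem_cons h
    have hc' : (if up = true then nums[i] < nums[i+1]'h else nums[i+1]'h < nums[i]) := by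
      cases up <;> simpa using hc
    rw [ih, hd, hd2, segLen_cons, ← hd2, if_pos hc']
    omega
  | case2 i h hc =>
    have hd : nums.drop i = nums[i] :: nums.drop (i + 1) :=
      List.drop_eq_getElem_cons (by omega)
    have hd2 : nums.drop (i + 1) = nums[i+1] :: nums.drop (i + 2) :=
      List.drop_eq_getElem_cons h
    have hc' : ¬ (if up = true then nums[i] < nums[i+1]'h else nums[i+1]'h < nums[i]) := by
      cases up <;> simpa using hc
    rw [hd, hd2, segLen_cons, ← hd2, if_neg hc']; omega
  | case3 i h =>
    rcases Nat.lt_or_ge i nums.length with hi | hi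
    · have hnil : nums.drop (i + 1) = [] := List.drop_eq_nil_of_le (by omega)
      rw [List.drop_eq_getElem_cons hi, hnil, segLen_one]; omega
    · rw [List.drop_eq_nil_of_le hi, segLen_nil]; omega

theorem go2_eq (f : Bool) (prev : Int) : ∀ l : List Int,
    isTrionicV2Go 2 f prev l = (segLen true (prev :: l) == l.length)
  | [] => by simp [go_nil, segLen_one]
  | x :: xs => by
    rw [go2_cons, segLen_cons]
    rcases lt_trichotomy x prev with h | h | h
    · have h1 : (x == prev) = false := by simp; omega
      have h2 : ¬ (prev < x) := by omega
      simp only [h1, Bool.false_eq_true, if_false, h, if_true, if_pos, h2]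
      simp
    · subst h
      simp
    · have h1 : (x == prev) = false := by simp; omega
      have h2 : ¬ (x < prev) := by omega
      simp only [h1, Bool.false_eq_true, if_false, h2, h, if_true, if_pos]
      rw [go2_eq false x xs]
      simp

theorem go1_eq (f : Bool) (prev : Int) : ∀ l : List Int,
    isTrionicV2Go 1 f prev l =
      (let d := segLen false (prev :: l)
       let t := segLen true ((prev :: l).drop d)
       decide (d + t = l.length ∧ t ≠ 0))
  | [] => by simp [go_nil, segLen_one]
  | x :: xs => by
    rw [go1_cons]
    rcases lt_trichotomy x prev with h | h | h
    · have h1 : (x == prev) = false := by simp; omega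
      have h2 : ¬ (prev < x) := by omega
      simp only [h1, Bool.false_eq_true, if_false, h2]
      rw [go1_eq false x xs]
      have hd : segLen false (prev :: x :: xs) = segLen false (x :: xs) + 1 := by
        rw [segLen_cons]; simp [h]
      simp only [hd, List.drop_succ_cons, decide_eq_decide, List.length_cons]
      constructor <;> rintro ⟨h3, h4⟩ <;> exact ⟨by omega, h4⟩
    · subst h
      have hd : segLen false (x :: x :: xs) = 0 := by rw [segLen_cons]; simp
      have ht : segLen true (x :: x :: xs) = 0 := by rw [segLen_cons]; simp
      simp [hd, ht]
    · have h1 : (x == prev) = false := by simp; omega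
      simp only [h1, Bool.false_eq_true, if_false, h, if_true]
      rw [go2_eq false x xs]
      have hd : segLen false (prev :: x :: xs) = 0 := by rw [segLen_cons]; simp; omega
      have ht : segLen true (prev :: x :: xs) = segLen true (x :: xs) + 1 := by
        rw [segLen_cons]; simp [h]
      simp only [hd, List.drop_zero, ht, List.length_cons]
      rw [Bool.eq_iff_iff]
      simp only [beq_iff_eq, decide_eq_true_eq]
      omega

theorem go0_eq (prev : Int) : ∀ l : List Int,
    isTrionicV2Go 0 false prev l =
      (let u := segLen true (prev :: l)
       let d := segLen false ((prev :: l).drop u)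
       let t := segLen true ((prev :: l).drop (u + d))
       decide (u + d + t = l.length ∧ d ≠ 0 ∧ t ≠ 0))
  | [] => by simp [go_nil, segLen_one]
  | x :: xs => by
    rw [go0_cons]
    rcases lt_trichotomy x prev with h | h | h
    · have h1 : (x == prev) = false := by simp; omega
      simp only [h1, Bool.false_eq_true, if_false, h, if_true, if_pos, Bool.if_false_left]
      rw [go1_eq false x xs]
      have hu : segLen true (prev :: x :: xs) = 0 := by rw [segLen_cons]; simp; omega
      have hd : segLen false (prev :: x :: xs) = segLen false (x :: xs) + 1 := by
        rw [segLen_cons]; simp [h]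
      simp only [hu, List.drop_zero, hd, Nat.zero_add, List.drop_succ_cons,
        decide_eq_decide, List.length_cons]
      constructor <;> rintro ⟨h3, h4⟩
      · exact ⟨by omega, by omega, h4⟩
      · exact ⟨by omega, h4.2⟩
    · subst h
      have hu : segLen true (x :: x :: xs) = 0 := by rw [segLen_cons]; simp
      have hd : segLen false (x :: x :: xs) = 0 := by rw [segLen_cons]; simp
      simp [hu, hd]
    · have h1 : (x == prev) = false := by simp; omega
      have h2 : ¬ (x < prev) := by omega
      simp only [h1, Bool.false_eq_true, if_false, h2, if_true]
      rw [go0_eq x xs]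
      have hu : segLen true (prev :: x :: xs) = segLen true (x :: xs) + 1 := by
        rw [segLen_cons]; simp [h]
      simp only [hu, List.drop_succ_cons, List.length_cons]
      have harr : segLen true (x :: xs) + 1 + segLen false ((x :: xs).drop (segLen true (x :: xs))) =
          segLen true (x :: xs) + segLen false ((x :: xs).drop (segLen true (x :: xs))) + 1 := by omega
      rw [harr]
      simp only [List.drop_succ_cons, decide_eq_decide]
      constructor <;> rintro ⟨h3, h4⟩ <;> exact ⟨by omega, h4⟩

theorem isTrionicV2_eq_alt (nums : List Int) : isTrionicV2 nums = isTrionicV2_alt nums := by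
  cases nums with
  | nil => simp [isTrionicV2, isTrionicV2_alt, walk_eq, segLen_nil]
  | cons p l =>
    cases l with
    | nil =>
      simp [isTrionicV2, isTrionicV2_alt, walk_eq, go_nil, segLen_one]
    | cons x xs =>
      simp only [isTrionicV2, isTrionicV2_alt, walk_eq, List.drop_zero, Nat.zero_add, go0_cons]
      rcases lt_trichotomy x p with h | h | h
      · have h1 : (x == p) = false := by simp; omega
        have hu : segLen true (p :: x :: xs) = 0 := by rw [segLen_cons]; simp; omega
        simp [h1, h, hu]
      · subst h
        have hu : segLen true (x :: x :: xs) = 0 := by rw [segLen_cons]; simp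
        simp [hu]
      · have h1 : (x == p) = false := by simp; omega
        have h2 : ¬ (x < p) := by omega
        have hu : segLen true (p :: x :: xs) = segLen true (x :: xs) + 1 := by
          rw [segLen_cons]; simp [h]
        simp only [h1, Bool.false_eq_true, if_false, h2, if_true]
        rw [go0_eq x xs]
        have hune : (segLen true (p :: x :: xs) == 0) = false := by simp [hu]
        rw [hune]
        simp only [Bool.false_eq_true, if_false]
        have hdrop : (p :: x :: xs).drop (segLen true (p :: x :: xs)) =
            (x :: xs).drop (segLen true (x :: xs)) := by
          rw [hu, List.drop_succ_cons]
        set u' := segLen true (x :: xs) with hu'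
        set d' := segLen false ((x :: xs).drop u') with hd'
        have hD : segLen false ((p :: x :: xs).drop (segLen true (p :: x :: xs))) = d' := by
          rw [hdrop]
        rw [hD]
        have hdrop2 : (p :: x :: xs).drop (segLen true (p :: x :: xs) + d') =
            (x :: xs).drop (u' + d') := by
          rw [hu]
          have : (u' + 1) + d' = (u' + d') + 1 := by omega
          rw [this, List.drop_succ_cons]
        set t' := segLen true ((x :: xs).drop (u' + d')) with ht'
        have hT : segLen true ((p :: x :: xs).drop (segLen true (p :: x :: xs) + d')) = t' := by
          rw [hdrop2]
        rw [hT]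
        by_cases hdz : d' = 0
        · have : (segLen true (p :: x :: xs) + d' == segLen true (p :: x :: xs)) = true := by
            simp [hdz]
          rw [this]
          simp only [if_true]
          rw [Bool.eq_iff_iff]
          simp only [decide_eq_true_eq, Bool.false_eq_true, iff_false]
          rintro ⟨_, hd0, _⟩; exact hd0 hdz
        · have hne2 : (segLen true (p :: x :: xs) + d' == segLen true (p :: x :: xs)) = false := by
            simp; omega
          rw [hne2]
          simp only [Bool.false_eq_true, if_false]
          by_cases htz : t' = 0
          · have : (segLen true (p :: x :: xs) + d' + t' == segLen true (p :: x :: xs) + d') = true := by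
              simp [htz]
            rw [this]
            simp only [if_true]
            rw [Bool.eq_iff_iff]
            simp only [decide_eq_true_eq, Bool.false_eq_true, iff_false]
            rintro ⟨_, _, ht0⟩; exact ht0 htz
          · have hne3 : (segLen true (p :: x :: xs) + d' + t' == segLen true (p :: x :: xs) + d') = false := by
              simp; omega
            rw [hne3]
            simp only [Bool.false_eq_true, if_false]
            rw [Bool.eq_iff_iff]
            simp only [decide_eq_true_eq, beq_iff_eq, List.length_cons, hu]
            omega

-- ===== VERDICT (by name: the statement is the Claim_ definition above) =====
theorem isTrionicV2_spec : Claim_equal_isTrionicV2 := by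
  intro nums _
  exact isTrionicV2_eq_alt nums
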